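-- pv_equiv track=rewrite | github.com/LisovAlexandr/Python-course | recurs_reflect_add_bracket.py | rec_reflection
-- ===== SOURCE A (Python) =====
-- def rec_reflection(st:str, lst:list = None) -> str:
--     """takes a string 'as(d(((f' and return string + recurse reflection 'as(d(((ff)))d)sa'
--     'as(d((f' -> 'as(d((ff))d)sa'  when len str even
--     'as(d((f' -> 'as(d((ff))d)sa'  when len str odd
--     :param st:   string for change
--     :param lst:  list for result
--     :return:     result string"""
--     if lst == None:
--         # к нашей строке s будем дописывать развернутую s
--         # теперь в функции появился lst для созранения результата
--
--         lst = list(st)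
--     if len(st) == 0:
--         # здесь решение рекурсии, как бы конец цикла, когда срез строки достигнет нуля
--         return ''.join(lst)  # здесь решение рекурсии, как бы конец цикла
--     if st[-1] == '(':
--         # в s заменяем '(' на ')'
--
--         lst.append(')')
--     else:
--         # добавляем последний элемент st в конец lst
--
--         lst.append(st[-1])
--     # не забываем добавить второй параметр lst, где хранится результат
--     return rec_reflection(st[:-1], lst)
-- ===== SOURCE B (Python) =====
-- def rec_reflection(st, lst=None):
--     reflected = st[::-1].replace('(', ')')
--     if lst == None:
--         lst = list(st)
--     lst.extend(reflected)
--     return ''.join(lst)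
-- ===== Notes on version B (the rewrite author's own statement) =====
-- stated objective: simpler
-- what changed: Replaces A's per-character tail recursion over st[:-1] with one closed-form expression: the reflected half is computed in one shot as st[::-1].replace('(', ')') and appended to the accumulator.
import Mathlib
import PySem

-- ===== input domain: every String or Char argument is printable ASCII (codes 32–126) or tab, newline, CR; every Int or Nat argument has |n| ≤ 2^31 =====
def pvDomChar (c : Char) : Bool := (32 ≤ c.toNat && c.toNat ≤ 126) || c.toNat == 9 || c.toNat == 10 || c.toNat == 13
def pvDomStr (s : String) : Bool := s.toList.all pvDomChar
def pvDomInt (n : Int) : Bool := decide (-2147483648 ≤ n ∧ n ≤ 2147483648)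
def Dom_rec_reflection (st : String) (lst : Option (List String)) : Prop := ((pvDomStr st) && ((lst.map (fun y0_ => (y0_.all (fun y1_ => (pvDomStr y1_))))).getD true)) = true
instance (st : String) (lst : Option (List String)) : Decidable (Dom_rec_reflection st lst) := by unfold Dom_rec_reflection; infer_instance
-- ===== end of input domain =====

-- B computes the reflected half in one closed-form expression (reverse + replace) instead of A's
-- per-character tail recursion; equivalence is about the RETURN value (both Pythons also extend a
-- caller-supplied lst in the same way).

-- ===== PORT A =====
-- the tail recursion of A: peel st's last character, append ')' for '(' else the character itself
def recReflA (cs : List Char) (acc : List String) : String :=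
  if h : cs = [] then PySem.Str.join "" acc
  else
    recReflA cs.dropLast
      (acc ++ [if cs.getLast h = '(' then ")" else String.ofList [cs.getLast h]])
termination_by cs.length
decreasing_by
  have : cs.length ≠ 0 := fun hl => h (List.eq_nil_of_length_eq_zero hl)
  simp [List.length_dropLast]; omega

def rec_reflection (st : String) (lst : Option (List String)) : String :=
  -- `if lst == None: lst = list(st)`
  let l := match lst with
    | none => st.toList.map (fun c => String.ofList [c])
    | some l => l
  recReflA st.toList l

-- ===== PORT B =====
def rec_reflection_alt (st : String) (lst : Option (List String)) : String :=
  -- reflected = st[::-1].replace('(', ')')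
  let reflected := PySem.Str.replace (String.ofList st.toList.reverse) "(" ")"
  let l := match lst with
    | none => st.toList.map (fun c => String.ofList [c])
    | some l => l
  -- lst.extend(reflected); return ''.join(lst)
  PySem.Str.join "" (l ++ reflected.toList.map (fun c => String.ofList [c]))

-- ===== PRECONDITION & SPEC =====
def Spec_rec_reflection (st : String) (lst : Option (List String)) (out : String) : Prop := out = rec_reflection_alt st lst
instance (st : String) (lst : Option (List String)) (out : String) : Decidable (Spec_rec_reflection st lst out) := by unfold Spec_rec_reflection; infer_instance

-- ===== CLAIM (what is proved, stated in full; the proofs are below) =====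
def Claim_equal_rec_reflection : Prop := ∀ (st : String) (lst : Option (List String)), Dom_rec_reflection st lst → Spec_rec_reflection st lst (rec_reflection st lst)

-- ===== LEMMAS AND PROOFS =====

-- single-character replace is a map
theorem replace_go_single_char (old new : Char) :
    ∀ (fuel : Nat) (l acc : List Char), l.length ≤ fuel →
      PySem.Chars.replace.go [old] [new] fuel l acc
        = acc.reverse ++ l.map (fun c => if c = old then new else c) := by
  intro fuel
  induction fuel with
  | zero =>
    intro l acc hl
    have : l = [] := List.eq_nil_of_length_eq_zero (Nat.le_zero.mp hl)
    subst this
    simp [PySem.Chars.replace.go]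
  | succ n ih =>
    intro l acc hl
    cases l with
    | nil => simp [PySem.Chars.replace.go]
    | cons c t =>
      by_cases hc : c = old
      · subst hc
        have hpre : List.isPrefixOf [c] (c :: t) = true := by
          simp [List.isPrefixOf]
        rw [PySem.Chars.replace.go]
        simp only [hpre, if_true, List.length_cons, List.length_nil,
          List.drop_succ_cons, List.drop_zero, List.reverse_cons, List.reverse_nil,
          List.nil_append, List.singleton_append]
        rw [ih t (new :: acc) (by simpa using Nat.lt_succ_iff.mp (by simpa using hl))]
        simp
      · have hpre : List.isPrefixOf [old] (c :: t) = false := by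
          simp [List.isPrefixOf]
          intro h; exact absurd h.symm hc
        rw [PySem.Chars.replace.go]
        simp only [hpre]
        rw [ih t (c :: acc) (by simpa using Nat.lt_succ_iff.mp (by simpa using hl))]
        simp [hc]

theorem replace_single_char (cs : List Char) (old new : Char) :
    PySem.Chars.replace cs [old] [new] = cs.map (fun c => if c = old then new else c) := by
  rw [PySem.Chars.replace]
  simp only [List.isEmpty_cons, Bool.false_eq_true, if_false]
  simpa using replace_go_single_char old new cs.length cs [] le_rfl

-- A's recursion computes the join of acc extended by the reflected characters
theorem recReflA_eq (cs : List Char) :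
    ∀ acc, recReflA cs acc
      = PySem.Str.join ""
          (acc ++ cs.reverse.map (fun c => if c = '(' then ")" else String.ofList [c])) := by
  induction cs using List.reverseRecOn with
  | nil => intro acc; rw [recReflA]; simp
  | append_singleton l a ih =>
    intro acc
    rw [recReflA]
    have hne : l ++ [a] ≠ [] := by simp
    simp only [dif_neg hne, List.getLast_concat, List.dropLast_concat]
    rw [ih]
    simp

-- ===== VERDICT (by name: the statement is the Claim_ definition above) =====
theorem rec_reflection_spec : Claim_equal_rec_reflection := by
  intro st lst _
  unfold Spec_rec_reflection rec_reflection rec_reflection_alt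
  rw [recReflA_eq]
  refine congrArg (PySem.Str.join "") (congrArg (fun x => _ ++ x) ?_)
  rw [PySem.Str.toList_replace]
  have h1 : ("(" : String).toList = ['('] := rfl
  have h2 : (")" : String).toList = [')'] := rfl
  have h3 : (String.ofList st.toList.reverse).toList = st.toList.reverse := String.toList_ofList
  rw [h1, h2, h3, replace_single_char, List.map_map]
  refine (List.map_congr_left ?_)
  intro c _
  by_cases hc : c = '('
  · simp only [Function.comp, hc, reduceIte]
  · simp [hc, Function.comp]
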